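-- pv_equiv track=rewrite | github.com/magicbuka/python_projects | pk2/json.py | count_unique_completed_tasks
-- ===== SOURCE A (Python) =====
-- def count_unique_completed_tasks(json_lst):
--     users = {}
--     for elem in json_lst:
--         users[elem["userId"]] = {"task_count": 0, "completed": 0}
--     for elem in json_lst:
--         users[elem["userId"]]["task_count"] += 1
--         if elem['completed']:
--             users[elem["userId"]]["completed"] += 1
--     return users
-- ===== SOURCE B (Python) =====
-- def count_unique_completed_tasks(json_lst):
--     groups = {}
--     for elem in json_lst:
--         groups.setdefault(elem["userId"], []).append(elem)
--     return {
--         user_id: {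
--             "task_count": len(tasks),
--             "completed": sum(1 for t in tasks if t["completed"]),
--         }
--         for user_id, tasks in groups.items()
--     }
-- ===== Notes on version B (the rewrite author's own statement) =====
-- stated objective: alternative
-- what changed: Replaces A's two counter-incrementing passes over the raw list with a group-then-aggregate scheme: one pass builds a dict from userId to the list of its task dicts, and a comprehension over the groups computes len and a truthy sum per user.
import Mathlib
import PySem

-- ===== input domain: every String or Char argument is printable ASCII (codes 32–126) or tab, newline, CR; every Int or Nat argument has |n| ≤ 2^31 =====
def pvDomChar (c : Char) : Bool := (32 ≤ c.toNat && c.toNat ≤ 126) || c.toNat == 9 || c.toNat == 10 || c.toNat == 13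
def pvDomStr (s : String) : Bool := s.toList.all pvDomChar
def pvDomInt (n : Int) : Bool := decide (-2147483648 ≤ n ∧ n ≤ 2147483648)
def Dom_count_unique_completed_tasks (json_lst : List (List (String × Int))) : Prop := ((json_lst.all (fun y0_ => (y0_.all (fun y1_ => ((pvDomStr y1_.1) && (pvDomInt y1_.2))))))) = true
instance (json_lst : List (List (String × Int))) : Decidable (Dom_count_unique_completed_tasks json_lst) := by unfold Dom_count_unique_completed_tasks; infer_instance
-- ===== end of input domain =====

-- B replaces A's two counter-incrementing passes with group-by-userId then aggregate per group (alternative decomposition, same cost).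

-- shared model of Python's elem[k] on a dict given as key/value pairs (last duplicate wins, as in dict construction)
def pvGet (elem : List (String × Int)) (k : String) : Option Int :=
  (PySem.Dict.ofList elem).get? k

-- model of Python truthiness of elem['completed'] (an int: truthy iff nonzero)
def pvTruthy (elem : List (String × Int)) : Bool :=
  match pvGet elem "completed" with
  | some c => c != 0
  | none => false

-- ===== PORT A =====
-- body of A's first loop: users[elem["userId"]] = {"task_count": 0, "completed": 0}
def pvA1step (d : PySem.Dict Int (PySem.Dict String Int)) (elem : List (String × Int)) :
    PySem.Dict Int (PySem.Dict String Int) :=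
  match pvGet elem "userId" with
  | some u => d.insert u (PySem.Dict.ofList [("task_count", (0 : Int)), ("completed", (0 : Int))])
  | none => d

-- body of A's second loop: the two += 1 updates (read-modify-write on the inner dict)
def pvA2step (d : PySem.Dict Int (PySem.Dict String Int)) (elem : List (String × Int)) :
    PySem.Dict Int (PySem.Dict String Int) :=
  match pvGet elem "userId" with
  | some u =>
    let inner := d.getD u PySem.Dict.empty
    let inner := inner.insert "task_count" (inner.getD "task_count" 0 + 1)
    let inner := if pvTruthy elem then inner.insert "completed" (inner.getD "completed" 0 + 1) else inner
    d.insert u inner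
  | none => d

def count_unique_completed_tasks (json_lst : List (List (String × Int))) : List (Int × List (String × Int)) :=
  let users := json_lst.foldl pvA1step PySem.Dict.empty
  let users2 := json_lst.foldl pvA2step users
  users2.items.map (fun p => (p.1, p.2.items))

-- ===== PORT B =====
-- body of B's grouping loop: groups.setdefault(elem["userId"], []).append(elem)
def pvBstep (d : PySem.Dict Int (List (List (String × Int)))) (elem : List (String × Int)) :
    PySem.Dict Int (List (List (String × Int))) :=
  match pvGet elem "userId" with
  | some u => d.modify u [] (fun ts => ts ++ [elem])
  | none => d

def count_unique_completed_tasks_alt (json_lst : List (List (String × Int))) : List (Int × List (String × Int)) :=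
  let groups := json_lst.foldl pvBstep PySem.Dict.empty
  groups.items.map (fun p =>
    (p.1, [("task_count", (p.2.length : Int)),
           ("completed", ((p.2.filter (fun t => pvTruthy t)).length : Int))]))

-- ===== PRECONDITION & SPEC =====
-- Pre_ excludes exactly the inputs where A raises KeyError: an element dict missing the
-- "userId" or "completed" key.
def Pre_count_unique_completed_tasks (json_lst : List (List (String × Int))) : Prop :=
  ∀ elem ∈ json_lst, "userId" ∈ elem.map Prod.fst ∧ "completed" ∈ elem.map Prod.fst
instance (json_lst : List (List (String × Int))) : Decidable (Pre_count_unique_completed_tasks json_lst) := by unfold Pre_count_unique_completed_tasks; infer_instance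

def pvWitness_count_unique_completed_tasks : (List (List (String × Int))) :=
  [[("userId", 1), ("completed", 1)], [("userId", 2), ("completed", 0)], [("userId", 1), ("completed", 5)]]

def Spec_count_unique_completed_tasks (json_lst : List (List (String × Int))) (out : List (Int × List (String × Int))) : Prop := out = count_unique_completed_tasks_alt json_lst
instance (json_lst : List (List (String × Int))) (out : List (Int × List (String × Int))) : Decidable (Spec_count_unique_completed_tasks json_lst out) := by unfold Spec_count_unique_completed_tasks; infer_instance

-- ===== CLAIM (what is proved, stated in full; the proofs are below) =====
def Claim_equal_count_unique_completed_tasks : Prop := ∀ (json_lst : List (List (String × Int))), Dom_count_unique_completed_tasks json_lst → Pre_count_unique_completed_tasks json_lst → Spec_count_unique_completed_tasks json_lst (count_unique_completed_tasks json_lst)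


-- ===== LEMMAS AND PROOFS =====

-- the userId of an element (well-defined under Pre_)
def pvKey (e : List (String × Int)) : Int := (pvGet e "userId").getD 0

-- the inner dict after updating counters
def pvInner (inner : PySem.Dict String Int) (e : List (String × Int)) : PySem.Dict String Int :=
  let inner := inner.insert "task_count" (inner.getD "task_count" 0 + 1)
  if pvTruthy e then inner.insert "completed" (inner.getD "completed" 0 + 1) else inner

def pvStep1 (d : PySem.Dict Int (PySem.Dict String Int)) (e : List (String × Int)) :
    PySem.Dict Int (PySem.Dict String Int) :=
  d.insert (pvKey e) (PySem.Dict.mk [("task_count", 0), ("completed", 0)])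

def pvStepA (d : PySem.Dict Int (PySem.Dict String Int)) (e : List (String × Int)) :
    PySem.Dict Int (PySem.Dict String Int) :=
  d.insert (pvKey e) (pvInner (d.getD (pvKey e) PySem.Dict.empty) e)

def pvStepB (d : PySem.Dict Int (List (List (String × Int)))) (e : List (String × Int)) :
    PySem.Dict Int (List (List (String × Int))) :=
  d.modify (pvKey e) [] (fun ts => ts ++ [e])

theorem pvGet_isSome (e : List (String × Int)) (k : String) (h : k ∈ e.map Prod.fst) :
    ∃ u, pvGet e k = some u := by
  rcases ho : pvGet e k with _ | u
  · exfalso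
    have hc := (PySem.Dict.get?_eq_none_iff_contains (PySem.Dict.ofList e) k).1 ho
    have hkeys : (PySem.Dict.ofList e).keys = PySem.Set.ofList (e.map Prod.fst) := by
      have := PySem.Dict.keys_foldl_insert_key e Prod.fst (fun _ p => p.2) PySem.Dict.empty
      simpa [PySem.Dict.keys_empty, PySem.Set.update_nil_left, PySem.Dict.ofList] using this
    have : k ∈ (PySem.Dict.ofList e).keys := by
      rw [hkeys, PySem.Set.mem_ofList]; exact h
    rw [← PySem.Dict.contains_iff_mem_keys] at this
    simp [hc] at this
  · exact ⟨u, rfl⟩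

theorem pvSet_update_self {s : PySem.Set Int} (xs : List Int) (h : ∀ x ∈ xs, x ∈ s) :
    PySem.Set.update s xs = s := by
  rw [PySem.Set.update_eq_append_filter]
  have : (PySem.Set.ofList xs).filter (fun y => !s.contains y) = [] := by
    rw [List.filter_eq_nil_iff]
    intro y hy
    have hys : y ∈ s := h y ((PySem.Set.mem_ofList xs y).1 hy)
    simp [hys]
  rw [this, List.append_nil]

-- A's first pass leaves the zero inner dict at every key it saw
theorem pvG1 (l : List (List (String × Int))) (u : Int) :
    ∀ d : PySem.Dict Int (PySem.Dict String Int),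
      (u ∈ l.map pvKey → (l.foldl pvStep1 d).getD u PySem.Dict.empty = PySem.Dict.mk [("task_count", 0), ("completed", 0)]) ∧
      (u ∉ l.map pvKey → (l.foldl pvStep1 d).getD u PySem.Dict.empty = d.getD u PySem.Dict.empty) := by
  induction l with
  | nil => intro d; simp
  | cons e l ih =>
    intro d
    have hstep : (pvStep1 d e).getD u PySem.Dict.empty =
        if u = pvKey e then PySem.Dict.mk [("task_count", 0), ("completed", 0)] else d.getD u PySem.Dict.empty := by
      rw [pvStep1, PySem.Dict.getD_insert]
    constructor
    · intro hu
      by_cases hk : u ∈ l.map pvKey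
      · simpa [List.foldl_cons] using (ih (pvStep1 d e)).1 hk
      · have hke : u = pvKey e := by
          simp only [List.map_cons, List.mem_cons] at hu
          rcases hu with hu | hu
          · exact hu
          · exact absurd hu hk
        rw [List.foldl_cons, (ih _).2 hk, hstep, if_pos hke]
    · intro hu
      simp only [List.map_cons, List.mem_cons, not_or] at hu
      rw [List.foldl_cons, (ih _).2 hu.2, hstep, if_neg hu.1]

-- A's second pass accumulates the two counters at u
theorem pvG2 (l : List (List (String × Int))) (u : Int) :
    ∀ (d : PySem.Dict Int (PySem.Dict String Int)) (t c : Int),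
      d.getD u PySem.Dict.empty = PySem.Dict.mk [("task_count", t), ("completed", c)] →
      (l.foldl pvStepA d).getD u PySem.Dict.empty =
        PySem.Dict.mk [("task_count", t + (((l.filter (fun e => pvKey e == u)).length : Int))),
                       ("completed", c + ((((l.filter (fun e => pvKey e == u)).filter pvTruthy).length : Int)))] := by
  induction l with
  | nil => intro d t c h; simpa using h
  | cons e l ih =>
    intro d t c h
    rw [List.foldl_cons]
    by_cases hk : pvKey e = u
    · have hin : (pvStepA d e).getD u PySem.Dict.empty =
          pvInner (PySem.Dict.mk [("task_count", t), ("completed", c)]) e := by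
        rw [pvStepA, hk, h, PySem.Dict.getD_insert_self]
      by_cases ht : pvTruthy e = true
      · have : pvInner (PySem.Dict.mk [("task_count", t), ("completed", c)]) e =
            PySem.Dict.mk [("task_count", t + 1), ("completed", c + 1)] := by
          simp [pvInner, ht]; rfl
        rw [this] at hin
        rw [ih _ _ _ hin]
        simp [hk, ht]
        omega
      · have : pvInner (PySem.Dict.mk [("task_count", t), ("completed", c)]) e =
            PySem.Dict.mk [("task_count", t + 1), ("completed", c)] := by
          simp [pvInner, ht]; rfl
        rw [this] at hin
        rw [ih _ _ _ hin]
        simp [hk, ht]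
        omega
    · have hin : (pvStepA d e).getD u PySem.Dict.empty = PySem.Dict.mk [("task_count", t), ("completed", c)] := by
        rw [pvStepA, PySem.Dict.getD_insert, if_neg (fun hh => hk hh.symm), h]
      rw [ih _ _ _ hin]
      simp [hk]

-- B's grouping pass collects, at u, exactly the elements keyed u, in order
theorem pvG3 (l : List (List (String × Int))) (u : Int)
    (d : PySem.Dict Int (List (List (String × Int)))) :
    (l.foldl pvStepB d).getD u [] = d.getD u [] ++ l.filter (fun e => pvKey e == u) := by
  have h1 : l.foldl pvStepB d =
      (l.map (fun e => (pvKey e, e))).foldl (fun d p => d.modify p.1 [] (fun ts => ts ++ [p.2])) d := by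
    rw [List.foldl_map]; rfl
  rw [h1, PySem.Dict.getD_foldl_modify_append, List.filter_map]
  congr 1
  rw [List.map_map]
  have : ((fun (x : Int × List (String × Int)) => x.2) ∘ fun e => (pvKey e, e)) = id := rfl
  rw [this, List.map_id]
  congr 1

theorem count_unique_completed_tasks_spec : Claim_equal_count_unique_completed_tasks := by
  intro json_lst _hdom hpre
  unfold Spec_count_unique_completed_tasks count_unique_completed_tasks count_unique_completed_tasks_alt
  have hsome : ∀ e ∈ json_lst, ∃ u, pvGet e "userId" = some u :=
    fun e he => pvGet_isSome e _ (hpre e he).1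

  have h1 : json_lst.foldl pvA1step PySem.Dict.empty = json_lst.foldl pvStep1 PySem.Dict.empty := by
    apply PySem.List.foldl_congr_mem
    intro acc x hx
    rcases hsome x hx with ⟨u, hu⟩
    simp [pvA1step, hu, pvStep1, pvKey]
    rfl
  have h2 : ∀ d0 : PySem.Dict Int (PySem.Dict String Int),
      json_lst.foldl pvA2step d0 = json_lst.foldl pvStepA d0 := by
    intro d0
    apply PySem.List.foldl_congr_mem
    intro acc x hx
    rcases hsome x hx with ⟨u, hu⟩
    simp [pvA2step, hu, pvStepA, pvInner, pvKey]
  have h3 : json_lst.foldl pvBstep PySem.Dict.empty = json_lst.foldl pvStepB PySem.Dict.empty := by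
    apply PySem.List.foldl_congr_mem
    intro acc x hx
    rcases hsome x hx with ⟨u, hu⟩
    simp [pvBstep, hu, pvStepB, pvKey]
  dsimp only []
  rw [h1, h2, h3]
  set d1 := json_lst.foldl pvStep1 PySem.Dict.empty with hd1
  set d2 := json_lst.foldl pvStepA d1 with hd2
  set dB := json_lst.foldl pvStepB PySem.Dict.empty with hdB
  have k1 : d1.keys = PySem.Set.ofList (json_lst.map pvKey) := by
    have h := PySem.Dict.keys_foldl_insert_key json_lst pvKey
      (fun _ _ => PySem.Dict.mk [("task_count", 0), ("completed", 0)])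
      (PySem.Dict.empty : PySem.Dict Int (PySem.Dict String Int))
    simpa [PySem.Dict.keys_empty, PySem.Set.update_nil_left] using h
  have k2 : d2.keys = PySem.Set.ofList (json_lst.map pvKey) := by
    have h := PySem.Dict.keys_foldl_insert_key json_lst pvKey
      (fun d e => pvInner (d.getD (pvKey e) PySem.Dict.empty) e) d1
    rw [hd2]
    rw [show json_lst.foldl pvStepA d1 =
      json_lst.foldl (fun d e => d.insert (pvKey e) (pvInner (d.getD (pvKey e) PySem.Dict.empty) e)) d1 from rfl]
    rw [h, k1]
    apply pvSet_update_self
    intro x hx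
    exact (PySem.Set.mem_ofList _ _).2 hx
  have kB : dB.keys = PySem.Set.ofList (json_lst.map pvKey) := by
    have h := PySem.Dict.keys_foldl_modify_key json_lst pvKey ([] : List (List (String × Int)))
      (fun _ e ts => ts ++ [e]) PySem.Dict.empty
    rw [hdB]
    rw [show json_lst.foldl pvStepB PySem.Dict.empty =
      json_lst.foldl (fun d e => d.modify (pvKey e) [] ((fun _ e ts => ts ++ [e]) d e)) PySem.Dict.empty from rfl]
    rw [h, PySem.Dict.keys_empty, PySem.Set.update_nil_left]
  have nodupK : (PySem.Set.ofList (json_lst.map pvKey)).Nodup := PySem.Set.nodup_ofList _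
  have nd2 : d2.keys.Nodup := by rw [k2]; exact nodupK
  have ndB : dB.keys.Nodup := by rw [kB]; exact nodupK
  rw [PySem.Dict.items_eq_map_keys d2 nd2 PySem.Dict.empty, k2,
      PySem.Dict.items_eq_map_keys dB ndB [], kB, List.map_map, List.map_map]
  apply List.map_congr_left
  intro u hu
  have humem : u ∈ json_lst.map pvKey := (PySem.Set.mem_ofList _ _).1 hu
  have g1 : d1.getD u PySem.Dict.empty = PySem.Dict.mk [("task_count", 0), ("completed", 0)] :=
    (pvG1 json_lst u PySem.Dict.empty).1 humem
  have g2 := pvG2 json_lst u d1 0 0 g1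
  have g3 := pvG3 json_lst u PySem.Dict.empty
  rw [← hd2] at g2
  rw [← hdB] at g3
  simp only [Function.comp_apply, g2, g3, PySem.Dict.getD_empty, List.nil_append, zero_add]
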